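-- pv_equiv track=rewrite | github.com/saifutkhan/tweetAnalysis | process-tweets.py | wordVectors
-- ===== SOURCE A (Python) =====
-- bagofwords=['gold', 'stock', 'price', 'trade', 'down', 'gain', 'loss', 'high', 'low', 'spot']
--
-- def wordVectors(words):
--     vector={}
--     for s in bagofwords:
--         vector[s]=0
--     for word in words:
--         for bagword in bagofwords:
--             if word.lower() == bagword.lower():
--                 vector[word.lower()]=vector[word.lower()]+1
--     return vector
-- ===== SOURCE B (Python) =====
-- bagofwords=['gold', 'stock', 'price', 'trade', 'down', 'gain', 'loss', 'high', 'low', 'spot']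
--
-- def wordVectors(words):
--     # One pass: tally lowered words, then gather counts for the fixed bagwords.
--     tally = {}
--     for word in words:
--         w = word.lower()
--         tally[w] = tally.get(w, 0) + 1
--     return {bag: tally.get(bag, 0) for bag in bagofwords}
-- ===== Notes on version B (the rewrite author's own statement) =====
-- stated objective: faster
-- what changed: Replaces A's nested words-by-bagwords matching loop (with a vector re-lookup per hit) by a single tally pass over the lowered words followed by a gather pass over the fixed bagofwords list.
import Mathlib
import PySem

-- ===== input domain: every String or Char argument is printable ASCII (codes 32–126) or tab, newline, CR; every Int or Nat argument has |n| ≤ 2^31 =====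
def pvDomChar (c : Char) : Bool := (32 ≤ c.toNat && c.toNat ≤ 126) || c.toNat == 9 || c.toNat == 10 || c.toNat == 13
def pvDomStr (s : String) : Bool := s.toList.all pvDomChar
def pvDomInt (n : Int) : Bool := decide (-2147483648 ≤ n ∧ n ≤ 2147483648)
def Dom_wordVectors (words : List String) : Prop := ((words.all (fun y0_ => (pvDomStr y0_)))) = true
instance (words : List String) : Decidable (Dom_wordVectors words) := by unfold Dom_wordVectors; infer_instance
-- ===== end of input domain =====

-- B replaces A's nested words×bagofwords matching loop by one tally pass plus a gather pass (faster by a constant factor).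

def bagofwords : List String :=
  ["gold", "stock", "price", "trade", "down", "gain", "loss", "high", "low", "spot"]

-- ===== PORT A =====
-- vector[word.lower()] = vector[word.lower()] + 1 is ported with getD: the key word.lower()
-- equals bagword (a lowercase bag key already in vector), so the KeyError branch / default is unreachable — exact.
def wordVectors (words : List String) : List (String × Int) :=
  let vector : PySem.Dict String Int :=
    bagofwords.foldl (fun v s => v.insert s 0) PySem.Dict.empty
  let vector :=
    words.foldl (fun v word =>
      bagofwords.foldl (fun v bagword =>
        if PySem.Str.lower word == PySem.Str.lower bagword then
          v.insert (PySem.Str.lower word) (v.getD (PySem.Str.lower word) 0 + 1)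
        else v) v) vector
  vector.items

-- ===== PORT B =====
def wordVectors_alt (words : List String) : List (String × Int) :=
  let tally : PySem.Dict String Int :=
    words.foldl (fun d word => d.modify (PySem.Str.lower word) 0 (· + 1)) PySem.Dict.empty
  bagofwords.map (fun bag => (bag, tally.getD bag 0))

-- ===== PRECONDITION & SPEC =====
def Spec_wordVectors (words : List String) (out : List (String × Int)) : Prop := out = wordVectors_alt words
instance (words : List String) (out : List (String × Int)) : Decidable (Spec_wordVectors words out) := by unfold Spec_wordVectors; infer_instance

-- ===== CLAIM (what is proved, stated in full; the proofs are below) =====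
def Claim_equal_wordVectors : Prop := ∀ (words : List String), Dom_wordVectors words → Spec_wordVectors words (wordVectors words)

-- ===== LEMMAS AND PROOFS =====

theorem bag_nodup : bagofwords.Nodup := by decide

theorem bag_lower : ∀ b ∈ bagofwords, PySem.Str.lower b = b := by decide

-- A word matching no element of the iteration list leaves the dict untouched.
theorem inner_no_match (w : String) (iter : List String)
    (hlow : ∀ b ∈ iter, PySem.Str.lower b = b)
    (hnm : PySem.Str.lower w ∉ iter) (d : PySem.Dict String Int) :
    iter.foldl (fun v bagword =>
      if PySem.Str.lower w == PySem.Str.lower bagword then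
        v.insert (PySem.Str.lower w) (v.getD (PySem.Str.lower w) 0 + 1)
      else v) d = d := by
  induction iter generalizing d with
  | nil => rfl
  | cons b t ih =>
    have hb : PySem.Str.lower b = b := hlow b (by simp)
    have hne : PySem.Str.lower w ≠ b := fun h => hnm (h ▸ List.mem_cons_self)
    rw [List.foldl_cons]
    simp only [hb]
    rw [if_neg (by simp [hne])]
    exact ih (fun x hx => hlow x (List.mem_cons_of_mem _ hx)) (fun h => hnm (List.mem_cons_of_mem _ h)) d

-- A's inner loop over a nodup lowercase list performs at most one increment.
theorem inner_fold (w : String) (iter : List String) (hnd : iter.Nodup)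
    (hlow : ∀ b ∈ iter, PySem.Str.lower b = b) (d : PySem.Dict String Int) :
    iter.foldl (fun v bagword =>
      if PySem.Str.lower w == PySem.Str.lower bagword then
        v.insert (PySem.Str.lower w) (v.getD (PySem.Str.lower w) 0 + 1)
      else v) d =
    (if PySem.Str.lower w ∈ iter then
      d.insert (PySem.Str.lower w) (d.getD (PySem.Str.lower w) 0 + 1) else d) := by
  induction iter generalizing d with
  | nil => rfl
  | cons b t ih =>
    have hb : PySem.Str.lower b = b := hlow b (by simp)
    have hlt : ∀ x ∈ t, PySem.Str.lower x = x := fun x hx => hlow x (List.mem_cons_of_mem _ hx)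
    rw [List.foldl_cons]
    simp only [hb]
    by_cases h : PySem.Str.lower w = b
    · have hnt : PySem.Str.lower w ∉ t := h ▸ (List.nodup_cons.mp hnd).1
      rw [if_pos (by simp [h]), inner_no_match w t hlt hnt _,
        if_pos (List.mem_cons.mpr (Or.inl h))]
    · rw [if_neg (by simp [h]), ih (List.nodup_cons.mp hnd).2 hlt d]
      simp [List.mem_cons, h]

-- A's outer loop, with an invariant dict whose keys are exactly bagofwords.
theorem outer_fold (words : List String) (d : PySem.Dict String Int)
    (hk : d.keys = bagofwords) :
    (words.foldl (fun v word =>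
      bagofwords.foldl (fun v bagword =>
        if PySem.Str.lower word == PySem.Str.lower bagword then
          v.insert (PySem.Str.lower word) (v.getD (PySem.Str.lower word) 0 + 1)
        else v) v) d).items =
    bagofwords.map (fun s => (s, d.getD s 0 + ((words.map PySem.Str.lower).count s : Int))) := by
  induction words generalizing d with
  | nil =>
    simp only [List.foldl_nil, List.map_nil, List.count_nil, Nat.cast_zero, add_zero]
    rw [PySem.Dict.items_eq_map_keys d (hk ▸ bag_nodup) 0, hk]
  | cons w t ih =>
    rw [List.foldl_cons, inner_fold w bagofwords bag_nodup bag_lower d]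
    by_cases hmem : PySem.Str.lower w ∈ bagofwords
    · have hcont : d.contains (PySem.Str.lower w) = true := by
        rw [PySem.Dict.contains_iff_mem_keys, hk]; exact hmem
      rw [if_pos hmem,
        ih _ (by rw [PySem.Dict.keys_insert_of_contains _ _ hcont, hk])]
      apply List.map_congr_left
      intro s hs
      rw [PySem.Dict.getD_insert]
      by_cases hsw : s = PySem.Str.lower w
      · subst hsw
        simp [List.map_cons]
        ring
      · have : PySem.Str.lower w ≠ s := fun h => hsw h.symm
        simp [hsw, List.map_cons, this]
    · rw [if_neg hmem, ih d hk]
      apply List.map_congr_left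
      intro s hs
      have : PySem.Str.lower w ≠ s := fun h => hmem (h ▸ hs)
      simp [List.map_cons, this]

-- The initial dict: all ten bag keys mapped to 0.
theorem init_items :
    (bagofwords.foldl (fun v s => v.insert s 0) (PySem.Dict.empty : PySem.Dict String Int)).items
      = bagofwords.map (fun s => (s, (0 : Int))) := by decide

theorem init_keys :
    (bagofwords.foldl (fun v s => v.insert s 0) (PySem.Dict.empty : PySem.Dict String Int)).keys
      = bagofwords := by decide

theorem init_getD (s : String) (hs : s ∈ bagofwords) :
    (bagofwords.foldl (fun v s => v.insert s 0) (PySem.Dict.empty : PySem.Dict String Int)).getD s 0 = 0 := by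
  apply PySem.Dict.getD_of_mem_items
  · rw [init_items]; exact List.mem_map.mpr ⟨s, hs, rfl⟩
  · rw [init_keys]; exact bag_nodup

-- B's tally lookup is a plain count over the lowered words.
theorem alt_eq (words : List String) :
    wordVectors_alt words =
      bagofwords.map (fun s => (s, ((words.map PySem.Str.lower).count s : Int))) := by
  unfold wordVectors_alt
  apply List.map_congr_left
  intro s hs
  rw [← List.foldl_map (f := PySem.Str.lower)
        (g := fun d x => PySem.Dict.modify d x 0 (· + 1)),
      PySem.Dict.getD_foldl_modify_add_one, PySem.Dict.getD_empty, zero_add]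

-- ===== VERDICT (by name: the statement is the Claim_ definition above) =====
theorem wordVectors_spec : Claim_equal_wordVectors := by
  intro words _
  unfold Spec_wordVectors wordVectors
  rw [outer_fold words _ init_keys, alt_eq]
  apply List.map_congr_left
  intro s hs
  rw [init_getD s hs, zero_add]
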